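-- pv_equiv track=rewrite | github.com/kaustav258/Matrix_Calculator | matrix.py | adjoint_pre
-- ===== SOURCE A (Python) =====
-- def find_Determinante(matrix):
--         if(len(matrix) == len(matrix[0])):
--             determinant = 0
--             # Base case for 1x1 matrix
--             if len(matrix) == 1:
--                 return matrix[0][0]
--
--             # Base case for 2x2 matrix
--             if len(matrix) == 2:
--                 determinant = matrix[0][0] * matrix[1][1] - matrix[0][1] * matrix[1][0]
--                 return round(determinant, 3)
--
--             # Iterate over the first row of the matrix
--             for j in range(len(matrix)):
--                 cofactor = (-1) ** j * matrix[0][j]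
--                 submatrix = [[matrix[i][k] for k in range(len(matrix)) if k != j] for i in range(1, len(matrix))]
--                 sub_determinant = find_Determinante(submatrix)
--                 determinant += cofactor * sub_determinant
--
--             return round(determinant, 3)
--         else :
--             return matrix
--
-- def transpose_pre(matrix):
--     row = len(matrix)
--     column = len(matrix[0])
--     transposed = []
--
--     for i in range(column):
--         rows = []
--         for j in range(row):
--             value = 0
--             rows.append(value)
--         transposed.append(rows)
--
--     for i in range(row):
--         for j in range(column):
--             transposed[j][i] = matrix[i][j]
--
--     return transposed
--
-- def get_cofactor_adjoint(matrix, i, j):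
--     # Remove the i-th row and j-th column from the matrix
--     return [[matrix[row][col] for col in range(len(matrix[row])) if col != j] for row in range(len(matrix)) if row != i]
--
-- def adjoint_pre(matrix):
--     row = len(matrix)
--     column = len(matrix[0])
--     if(row == column):
--         order = len(matrix)
--         adjoint = []
--         for i in range(order):
--             adjoint_row = []
--             for j in range(order):
--                 # Calculate the cofactor matrix
--                 cofactor = get_cofactor_adjoint(matrix, i, j)
--                 # Calculate the determinant of the cofactor matrix
--                 cofactor_determinant = find_Determinante(cofactor)
--                 # Multiply by (-1)^(i+j)
--                 sign = (-1) ** (i + j)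
--                 value = round(sign * cofactor_determinant, 1)
--                 adjoint_row.append(value)
--             adjoint.append(adjoint_row)
--         # Transpose the adjoint matrix
--         adjoint = transpose_pre(adjoint)
--         return adjoint
--     else :
--         return matrix
-- ===== SOURCE B (Python) =====
-- # B: builds the adjugate transposed-directly (no separate transpose pass) and computes each
-- # cofactor determinant by Laplace expansion over index lists (rows list + active column indices),
-- # never materialising submatrices.
--
-- def _minor_det(rows, cols):
--     # Determinant of the matrix formed by the given rows restricted to the column indices `cols`.
--     if len(cols) == 1:
--         return rows[0][cols[0]]
--     total = 0
--     for t in range(len(cols)):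
--         total += (-1) ** t * rows[0][cols[t]] * _minor_det(rows[1:], cols[:t] + cols[t + 1:])
--     return total
--
-- def adjoint_pre(matrix):
--     n = len(matrix)
--     if len(matrix[0]) != n:
--         return matrix
--     result = []
--     for j in range(n):
--         out_row = []
--         for i in range(n):
--             rows = [matrix[r] for r in range(n) if r != i]
--             cols = [c for c in range(n) if c != j]
--             out_row.append((-1) ** (i + j) * _minor_det(rows, cols))
--         result.append(out_row)
--     return result
-- ===== Notes on version B (the rewrite author's own statement) =====
-- stated objective: alternative
-- what changed: B builds the adjugate directly in transposed order (no zero-filled buffer and no separate transpose pass) and computes each cofactor determinant by Laplace expansion over a list of active column indices and a shrinking row list, never materialising submatrices the way A's recursive find_Determinante does.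
import Mathlib
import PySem

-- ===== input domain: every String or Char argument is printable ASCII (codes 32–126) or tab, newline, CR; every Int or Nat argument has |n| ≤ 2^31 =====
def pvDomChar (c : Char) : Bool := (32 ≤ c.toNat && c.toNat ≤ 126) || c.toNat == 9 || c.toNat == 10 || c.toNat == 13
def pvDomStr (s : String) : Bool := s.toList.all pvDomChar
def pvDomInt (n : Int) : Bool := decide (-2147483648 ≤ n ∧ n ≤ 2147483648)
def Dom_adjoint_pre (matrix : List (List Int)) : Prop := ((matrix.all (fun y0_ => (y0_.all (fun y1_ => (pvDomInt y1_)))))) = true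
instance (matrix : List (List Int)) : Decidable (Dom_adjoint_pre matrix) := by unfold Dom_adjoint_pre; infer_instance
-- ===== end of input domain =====

-- B builds the adjugate transposed-directly and expands each cofactor determinant over index
-- lists instead of materialising submatrices; equivalence is proved on square matrices (n ≥ 2)
-- and on the non-square early-return path.

-- ===== PORT A =====
-- matrix[i] (index from range(...), in range whenever the Python runs without an exception)
def pvGetRow (m : List (List Int)) (i : Int) : List Int := PySem.List.pyGetD m i []
-- row[j], same remark
def pvGetI (r : List Int) (j : Int) : Int := PySem.List.pyGetD r j 0
-- matrix[i][j]
def pvEntry (m : List (List Int)) (i j : Int) : Int := pvGetI (pvGetRow m i) j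

-- get_cofactor_adjoint(matrix, i, j)
def getCofactorAdjoint (matrix : List (List Int)) (i j : Int) : List (List Int) :=
  ((PySem.List.pyRange 0 matrix.length).filter (fun row => row ≠ i)).map (fun row =>
    ((PySem.List.pyRange 0 (pvGetRow matrix row).length).filter (fun col => col ≠ j)).map
      (fun col => pvEntry matrix row col))

-- find_Determinante(matrix): structural fuel replaces Python's unbounded recursion; every
-- recursive call is on a submatrix one row shorter, so fuel = matrix.length is exact.
-- round(x, 3) on an int is the identity and is omitted.  In the non-square branch Python
-- returns the matrix itself (not an int) and every caller then raises; that branch yields 0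
-- here and is excluded by Pre_.  (-1) ** j is ported with j.toNat: j ≥ 0 comes from range().
def findDetF : Nat → List (List Int) → Int
  | 0, _ => 0
  | fuel+1, m =>
    if m.length = (pvGetRow m 0).length then
      if m.length = 1 then pvEntry m 0 0
      else if m.length = 2 then
        pvEntry m 0 0 * pvEntry m 1 1 - pvEntry m 0 1 * pvEntry m 1 0
      else
        (PySem.List.pyRange 0 (m.length : Int)).foldl (fun determinant j =>
          determinant + (-1 : Int) ^ j.toNat * pvEntry m 0 j *
            findDetF fuel ((PySem.List.pyRange 1 (m.length : Int)).map (fun i =>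
              ((PySem.List.pyRange 0 (m.length : Int)).filter (fun k => k ≠ j)).map
                (fun k => pvEntry m i k)))) 0
    else 0

-- transpose_pre(matrix): the assignment transposed[j][i] = matrix[i][j] is List.set; both
-- indices are in range whenever the Python runs without an exception (j < column, i < row).
def transposePre (m : List (List Int)) : List (List Int) :=
  let row : Nat := m.length
  let column : Nat := (pvGetRow m 0).length
  let transposed := (PySem.List.pyRange 0 (column : Int)).foldl (fun t _i =>
      t ++ [(PySem.List.pyRange 0 (row : Int)).foldl (fun rws _j => rws ++ [(0 : Int)]) []]) []
  (PySem.List.pyRange 0 (row : Int)).foldl (fun t i =>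
    (PySem.List.pyRange 0 (column : Int)).foldl (fun t j =>
      t.set j.toNat ((pvGetRow t j).set i.toNat (pvEntry m i j))) t) transposed

-- adjoint_pre(matrix); round(x, 1) on an int is the identity and is omitted
def adjoint_pre (matrix : List (List Int)) : List (List Int) :=
  let row := matrix.length
  let column := (pvGetRow matrix 0).length
  if row = column then
    let order := matrix.length
    let adjoint := (PySem.List.pyRange 0 (order : Int)).foldl (fun adj i =>
      adj ++ [(PySem.List.pyRange 0 (order : Int)).foldl (fun arow j =>
        arow ++ [(-1 : Int) ^ (i + j).toNat *
          findDetF (getCofactorAdjoint matrix i j).length (getCofactorAdjoint matrix i j)]) []]) []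
    transposePre adjoint
  else matrix

-- ===== PORT B =====
-- _minor_det(rows, cols): fuel = cols.length is exact (each call drops one column index)
def minorDetF : Nat → List (List Int) → List Int → Int
  | 0, _, _ => 0
  | fuel+1, rows, cols =>
    if cols.length = 1 then
      pvGetI (PySem.List.pyGetD rows 0 []) (PySem.List.pyGetD cols 0 0)
    else
      (PySem.List.pyRange 0 (cols.length : Int)).foldl (fun total t =>
        total + (-1 : Int) ^ t.toNat * pvGetI (PySem.List.pyGetD rows 0 []) (PySem.List.pyGetD cols t 0) *
          minorDetF fuel (PySem.List.slice rows (some 1) none)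
            (PySem.List.slice cols none (some t) ++ PySem.List.slice cols (some (t + 1)) none)) 0

def adjoint_pre_alt (matrix : List (List Int)) : List (List Int) :=
  let n := matrix.length
  if (PySem.List.pyGetD matrix 0 []).length ≠ n then matrix
  else
    (PySem.List.pyRange 0 (n : Int)).foldl (fun result j =>
      result ++ [(PySem.List.pyRange 0 (n : Int)).foldl (fun outRow i =>
        outRow ++ [(-1 : Int) ^ (i + j).toNat *
          minorDetF ((PySem.List.pyRange 0 (n : Int)).filter (fun c => c ≠ j)).length
            (((PySem.List.pyRange 0 (n : Int)).filter (fun r => r ≠ i)).map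
              (fun r => PySem.List.pyGetD matrix r []))
            ((PySem.List.pyRange 0 (n : Int)).filter (fun c => c ≠ j))]) []]) []

-- ===== PRECONDITION & SPEC =====
-- Pre_ excludes [] (A raises IndexError), 1×1 matrices (A raises IndexError on the empty
-- cofactor) and ragged inputs whose first-row length equals the row count: on those A usually
-- raises (IndexError/TypeError) and, when it happens to return, the value depends on
-- accidental reads of entries outside the leading square.  Non-square inputs (first-row
-- length ≠ row count) are admitted: both programs return the input unchanged there.
def Pre_adjoint_pre (matrix : List (List Int)) : Prop :=
  matrix ≠ [] ∧ ((matrix.headD []).length = matrix.length →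
    (2 ≤ matrix.length ∧ ∀ r ∈ matrix, r.length = matrix.length))
instance (matrix : List (List Int)) : Decidable (Pre_adjoint_pre matrix) := by
  unfold Pre_adjoint_pre; infer_instance

def pvWitness_adjoint_pre : List (List Int) := [[1, 2], [3, 4]]

def Spec_adjoint_pre (matrix : List (List Int)) (out : List (List Int)) : Prop :=
  out = adjoint_pre_alt matrix
instance (matrix : List (List Int)) (out : List (List Int)) : Decidable (Spec_adjoint_pre matrix out) := by
  unfold Spec_adjoint_pre; infer_instance

-- ===== CLAIM (what is proved, stated in full; the proofs are below) =====
def Claim_equal_adjoint_pre : Prop := ∀ (matrix : List (List Int)),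
  Dom_adjoint_pre matrix → Pre_adjoint_pre matrix → Spec_adjoint_pre matrix (adjoint_pre matrix)

-- ===== LEMMAS AND PROOFS =====

-- selection of a set of rows restricted to a list of column indices (proof-side view of both
-- programs' minors)
def sel (rows : List (List Int)) (cols : List Int) : List (List Int) :=
  rows.map (fun r => cols.map (fun c => pvGetI r c))

lemma pyGetD_cons_zero {α : Type} (a : α) (l : List α) (d : α) :
    PySem.List.pyGetD (a :: l) 0 d = a := by
  simp

lemma pyRange_one_natCast (n : ℕ) :
    PySem.List.pyRange 1 ((n + 1 : ℕ) : ℤ) = (List.range n).map (fun k => ((k + 1 : ℕ) : ℤ)) := by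
  induction n with
  | zero => decide
  | succ m ih =>
    have h1 : ((m + 1 + 1 : ℕ) : ℤ) = ((m + 1 : ℕ) : ℤ) + 1 := by push_cast; ring
    rw [h1, PySem.List.pyRange_one_succ_right (by exact_mod_cast Nat.one_le_iff_ne_zero.mpr (by omega)), ih, List.range_succ]
    simp

lemma mapRange_getD {α : Type} (ys : List α) (d : α) (j : ℕ) (hj : j ≤ ys.length) :
    (List.range j).map (fun k => ys.getD k d) = ys.take j := by
  induction j with
  | zero => simp
  | succ m ih =>
    rw [List.range_succ, List.map_append, ih (by omega), List.take_add_one]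
    have : ys[m]? = some ys[m] := List.getElem?_eq_getElem (by omega)
    simp [List.getD_eq_getElem?_getD, this]

lemma mapRange_getD_full {α β : Type} (ys : List α) (d : α) (F : α → β) :
    (List.range ys.length).map (fun k => F (ys.getD k d)) = ys.map F := by
  have h := mapRange_getD ys d ys.length le_rfl
  calc (List.range ys.length).map (fun k => F (ys.getD k d))
      = ((List.range ys.length).map (fun k => ys.getD k d)).map F := by simp [List.map_map]
    _ = ys.map F := by rw [h, List.take_length]

lemma filter_range_ne (n j : ℕ) (hj : j < n) :
    (List.range n).filter (fun k => k ≠ j)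
      = List.range j ++ (List.range (n - (j + 1))).map (fun x => (j + 1) + x) := by
  obtain ⟨m, rfl⟩ : ∃ m, n = (j + 1) + m := ⟨n - (j + 1), by omega⟩
  have hm : (j + 1) + m - (j + 1) = m := by omega
  rw [hm, List.range_add, List.filter_append, List.filter_map]
  congr 1
  · rw [List.range_succ, List.filter_append]
    have h1 : (List.range j).filter (fun k => k ≠ j) = List.range j :=
      List.filter_eq_self.mpr (by intro a ha; simp at ha ⊢; omega)
    rw [h1]
    simp
  · rw [List.filter_eq_self.mpr]
    intro a ha
    simp at ha ⊢
    omega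

lemma filter_range_ne_len (n j : ℕ) (hj : j < n) :
    ((List.range n).filter (fun k => k ≠ j)).length = n - 1 := by
  rw [filter_range_ne n j hj]
  simp
  omega

lemma getD_drop' {α : Type} (ys : List α) (a k : ℕ) (d : α) :
    (ys.drop a).getD k d = ys.getD (a + k) d := by
  simp [List.getD_eq_getElem?_getD, List.getElem?_drop]

lemma mapFilterRange_getD {α : Type} (ys : List α) (d : α) (j : ℕ) (hj : j < ys.length) :
    ((List.range ys.length).filter (fun k => k ≠ j)).map (fun k => ys.getD k d)
      = ys.take j ++ ys.drop (j + 1) := by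
  rw [filter_range_ne _ j hj, List.map_append, mapRange_getD ys d j (by omega), List.map_map]
  congr 1
  have : ∀ x, ys.getD ((j+1) + x) d = (ys.drop (j+1)).getD x d := fun x => (getD_drop' ys (j+1) x d).symm
  calc (List.range (ys.length - (j + 1))).map ((fun k => ys.getD k d) ∘ fun x => (j + 1) + x)
      = (List.range (ys.drop (j+1)).length).map (fun x => (ys.drop (j+1)).getD x d) := by
        simp [List.length_drop]
    _ = ys.drop (j + 1) := by rw [mapRange_getD _ d _ le_rfl, List.take_length]

lemma filter_cast (n j : ℕ) :
    (PySem.List.pyRange 0 (n : ℤ)).filter (fun c => c ≠ (j : ℤ))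
      = ((List.range n).filter (fun k => k ≠ j)).map (fun k : ℕ => (k : ℤ)) := by
  have hp : ((fun c : ℤ => decide (c ≠ (j : ℤ))) ∘ fun k : ℕ => (k : ℤ))
      = fun k : ℕ => decide (k ≠ j) := by
    funext k
    simp [Function.comp]
  rw [PySem.List.pyRange_zero_natCast, List.filter_map, hp]

lemma innerSet (w : ℕ → Int) (p : ℕ) : ∀ (c : ℕ) (t : List (List Int)), c ≤ t.length →
    (List.range c).foldl (fun t j => t.set j ((t.getD j []).set p (w j))) t
      = ((List.range c).map (fun j => (t.getD j []).set p (w j))) ++ t.drop c := by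
  intro c
  induction c with
  | zero => intro t ht; simp
  | succ m ih =>
    intro t ht
    rw [List.range_succ, List.foldl_append, ih t (by omega)]
    have hmlen : ((List.range m).map (fun j => (t.getD j []).set p (w j))).length = m := by simp
    simp only [List.foldl_cons, List.foldl_nil]
    have hget : (((List.range m).map (fun j => (t.getD j []).set p (w j))) ++ t.drop m).getD m []
        = t.getD m [] := by
      rw [List.getD_eq_getElem?_getD, List.getElem?_append_right (by omega), hmlen]
      simp [List.getD_eq_getElem?_getD, List.getElem?_drop]
    rw [hget, List.set_append, if_neg (by omega), hmlen]
    have hdrop : t.drop m = t[m] :: t.drop (m + 1) := List.drop_eq_getElem_cons (by omega)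
    rw [hdrop, Nat.sub_self, List.set_cons_zero]
    simp [List.map_append]

lemma outerSet (v : ℕ → ℕ → Int) (n : ℕ) : ∀ (p : ℕ), p ≤ n →
    (List.range p).foldl (fun t i =>
        (List.range n).foldl (fun t j => t.set j ((t.getD j []).set i (v i j))) t)
      (List.replicate n (List.replicate n 0))
      = (List.range n).map (fun j =>
          ((List.range p).map (fun i => v i j)) ++ List.replicate (n - p) (0 : Int)) := by
  intro p
  induction p with
  | zero =>
    intro _
    simp [List.map_const']
  | succ q ih =>
    intro hp
    rw [List.range_succ, List.foldl_append, ih (by omega)]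
    simp only [List.foldl_cons, List.foldl_nil]
    set T := (List.range n).map (fun j => ((List.range q).map (fun i => v i j)) ++ List.replicate (n - q) (0 : Int)) with hT
    have hTlen : T.length = n := by simp [hT]
    rw [innerSet (fun j => v q j) q n T (by omega)]
    rw [List.drop_eq_nil_of_le (by omega), List.append_nil]
    apply List.map_congr_left
    intro j hj
    have hjn : j < n := List.mem_range.mp hj
    have hTget : T.getD j [] = ((List.range q).map (fun i => v i j)) ++ List.replicate (n - q) (0 : Int) := by
      rw [hT, List.getD_eq_getElem?_getD, List.getElem?_map, List.getElem?_range hjn]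
      simp
    rw [hTget, List.set_append, if_neg (by simp), List.length_map, List.length_range, Nat.sub_self]
    obtain ⟨m, hm⟩ : ∃ m, n - q = m + 1 := ⟨n - q - 1, by omega⟩
    rw [hm, List.replicate_succ, List.set_cons_zero]
    have hnm : n - (q + 1) = m := by omega
    simp [List.map_append, hnm]

lemma transposePre_map (n : ℕ) (hn : 0 < n) (v : ℕ → ℕ → Int) :
    transposePre ((List.range n).map (fun i => (List.range n).map (fun j => v i j)))
      = (List.range n).map (fun j => (List.range n).map (fun i => v i j)) := by
  set m : List (List Int) := (List.range n).map (fun i => (List.range n).map (fun j => v i j)) with hm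
  have hmlen : m.length = n := by simp [hm]
  have hm0 : (pvGetRow m 0).length = n := by
    obtain ⟨k, hk⟩ : ∃ k, n = k + 1 := ⟨n - 1, by omega⟩
    have : pvGetRow m 0 = (List.range n).map (fun j => v 0 j) := by
      rw [hm, hk, List.range_succ_eq_map]
      simp [pvGetRow]
    rw [this]; simp
  simp only [transposePre, hmlen, hm0]
  rw [PySem.List.pyRange_zero_natCast]
  simp only [List.foldl_map, PySem.List.foldl_append_singleton_eq_map, List.nil_append]
  simp only [Int.toNat_natCast, pvGetRow, PySem.List.pyGetD_natCast, List.map_const', List.length_range]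
  rw [outerSet (fun i j => pvEntry m ↑i ↑j) n n le_rfl]
  apply List.map_congr_left
  intro j hj
  have hjn : j < n := List.mem_range.mp hj
  rw [Nat.sub_self, List.replicate_zero, List.append_nil]
  apply List.map_congr_left
  intro i hi
  have hin : i < n := List.mem_range.mp hi
  have h1 : pvGetRow m ↑i = (List.range n).map (fun j => v i j) := by
    simp only [pvGetRow, PySem.List.pyGetD_natCast, hm]
    rw [List.getD_eq_getElem?_getD, List.getElem?_map, List.getElem?_range hin]
    rfl
  simp only [pvEntry, pvGetI, h1, PySem.List.pyGetD_natCast]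
  rw [List.getD_eq_getElem?_getD, List.getElem?_map, List.getElem?_range hjn]
  rfl


lemma getD_map_getD {α β : Type} (f : α → β) (ys : List α) (k : ℕ) (hk : k < ys.length)
    (d : β) (d' : α) : (ys.map f).getD k d = f (ys.getD k d') := by
  rw [List.getD_eq_getElem?_getD, List.getElem?_map, List.getElem?_eq_getElem hk,
    List.getD_eq_getElem?_getD, List.getElem?_eq_getElem hk]
  rfl

lemma pyGetD_cons_one {α : Type} (a : α) (l : List α) (d : α) :
    PySem.List.pyGetD (a :: l) 1 d = PySem.List.pyGetD l 0 d := by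
  have h1 := PySem.List.pyGetD_natCast (a :: l) 1 d
  have h2 := PySem.List.pyGetD_natCast l 0 d
  simp at h1 h2
  rw [h1, h2]

-- the central lemma: A's recursive determinant of the materialised minor equals B's
-- index-list determinant
lemma detEq : ∀ (fuel : ℕ) (rows : List (List Int)) (cols : List Int),
    rows.length = cols.length → cols.length = fuel →
    findDetF fuel (sel rows cols) = minorDetF fuel rows cols := by
  intro fuel
  induction fuel with
  | zero => intro rows cols _ _; simp [findDetF, minorDetF]
  | succ f ih =>
    intro rows cols h1 h2
    match rows, cols with
    | [], _ => simp at h1; omega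
    | _, [] => simp at h2
    | r0 :: rest, c0 :: ctl =>
    match f, rest, ctl with
    | 0, rest, ctl =>
      have hc : ctl = [] := by simpa using h2
      subst hc
      have hr : rest = [] := by simpa using h1
      subst hr
      simp [findDetF, minorDetF, sel, pvEntry, pvGetRow, pvGetI]
    | 1, rest, ctl =>
      obtain ⟨c1, hc⟩ : ∃ c1, ctl = [c1] := by
        simp at h2; exact ⟨ctl.headD 0, by cases ctl <;> simp_all⟩
      obtain ⟨r1, hr⟩ : ∃ r1, rest = [r1] := by
        simp at h1 h2; exact ⟨rest.headD [], by cases rest <;> simp_all⟩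
      subst hc hr
      have e1 : findDetF 2 (sel [r0, r1] [c0, c1])
          = pvGetI r0 c0 * pvGetI r1 c1 - pvGetI r0 c1 * pvGetI r1 c0 := by
        simp [findDetF, sel, pvEntry, pvGetRow, pvGetI, pyGetD_cons_one]
      have e2 : minorDetF 2 [r0, r1] [c0, c1]
          = pvGetI r0 c0 * pvGetI r1 c1 - pvGetI r0 c1 * pvGetI r1 c0 := by
        simp only [minorDetF]
        rw [if_neg (by simp)]
        simp only [List.length_cons, List.length_nil]
        rw [show ((((0:ℕ) + 1 + 1 : ℕ)) : ℤ) = (2:ℤ) by norm_num]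
        rw [show PySem.List.pyRange 0 (2:ℤ) = [0, 1] by decide]
        simp only [List.foldl_cons, List.foldl_nil]
        rw [show PySem.List.slice ([c0, c1] : List Int) none (some 0) = [] by rw [PySem.List.slice_to _ (by norm_num)]; rfl]
        rw [show PySem.List.slice ([c0, c1] : List Int) (some (0 + 1)) none = [c1] by rw [PySem.List.slice_from _ (by norm_num)]; rfl]
        rw [show PySem.List.slice ([c0, c1] : List Int) none (some 1) = [c0] by rw [PySem.List.slice_to _ (by norm_num)]; rfl]
        rw [show PySem.List.slice ([c0, c1] : List Int) (some (1 + 1)) none = [] by rw [PySem.List.slice_from _ (by norm_num)]; rfl]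
        rw [show PySem.List.slice ([r0, r1] : List (List Int)) (some 1) none = [r1] by rw [PySem.List.slice_from _ (by norm_num)]; rfl]
        simp [pvGetI, pyGetD_cons_one]
        ring
      rw [e1, e2]
    | (f'' + 2), rest, ctl =>
      have hcslen : (c0 :: ctl).length = f'' + 3 := by simpa using h2
      have hctl : ctl.length = f'' + 2 := by simp at h2; omega
      have hrestlen : rest.length = f'' + 2 := by simp at h1 h2 ⊢; omega
      have hmlen : (sel (r0 :: rest) (c0 :: ctl)).length = f'' + 3 := by
        simp [sel]; omega
      have hm0 : pvGetRow (sel (r0 :: rest) (c0 :: ctl)) 0 = (c0 :: ctl).map (pvGetI r0) := by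
        simp [sel, pvGetRow]
      rw [findDetF.eq_2, minorDetF.eq_2]
      rw [hmlen, hcslen, hm0]
      rw [if_pos (by simp; omega), if_neg (by omega), if_neg (by omega), if_neg (by omega)]
      rw [PySem.List.foldl_add, PySem.List.foldl_add, zero_add, zero_add]
      apply congrArg List.sum
      apply List.map_congr_left
      intro j hj
      have hj' := PySem.List.mem_pyRange_one.mp hj
      obtain ⟨k, rfl⟩ : ∃ k : ℕ, j = (k : ℤ) := ⟨j.toNat, (Int.toNat_of_nonneg hj'.1).symm⟩
      have hkn : k < f'' + 3 := by exact_mod_cast hj'.2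
      simp only [Int.toNat_natCast]
      -- the scalar factors agree
      have eEntry : pvEntry (sel (r0 :: rest) (c0 :: ctl)) 0 ↑k
          = pvGetI r0 (PySem.List.pyGetD (c0 :: ctl) ↑k 0) := by
        rw [pvEntry, hm0, pvGetI, PySem.List.pyGetD_natCast, PySem.List.pyGetD_natCast,
          getD_map_getD (pvGetI r0) (c0 :: ctl) k (by omega) 0 0]
      have eR0 : PySem.List.pyGetD (r0 :: rest) 0 ([] : List Int) = r0 := pyGetD_cons_zero _ _ _
      -- B's sliced arguments
      have eRows : PySem.List.slice (r0 :: rest) (some 1) none = rest := by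
        rw [PySem.List.slice_from _ (by norm_num)]; rfl
      have eCols : PySem.List.slice (c0 :: ctl) none (some ↑k) ++ PySem.List.slice (c0 :: ctl) (some (↑k + 1)) none
          = (c0 :: ctl).take k ++ (c0 :: ctl).drop (k + 1) := by
        rw [show (↑k + 1 : ℤ) = ((k + 1 : ℕ) : ℤ) by push_cast; ring,
          PySem.List.slice_to _ (by positivity), PySem.List.slice_from _ (by positivity)]
        simp
      -- A's materialised submatrix is the selection B recurses on
      have eSub : (PySem.List.pyRange 1 ((f'' + 3 : ℕ) : ℤ)).map (fun i =>
            ((PySem.List.pyRange 0 ((f'' + 3 : ℕ) : ℤ)).filter (fun q => q ≠ (k : ℤ))).map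
              (fun c => pvEntry (sel (r0 :: rest) (c0 :: ctl)) i c))
          = sel rest ((c0 :: ctl).take k ++ (c0 :: ctl).drop (k + 1)) := by
        rw [show ((f'' + 3 : ℕ) : ℤ) = (((f'' + 2) + 1 : ℕ) : ℤ) by push_cast; ring,
          pyRange_one_natCast, List.map_map,
          show sel rest ((c0 :: ctl).take k ++ (c0 :: ctl).drop (k + 1))
              = rest.map (fun r => ((c0 :: ctl).take k ++ (c0 :: ctl).drop (k + 1)).map (pvGetI r))
            from rfl,
          ← mapRange_getD_full rest []
            (fun r => ((c0 :: ctl).take k ++ (c0 :: ctl).drop (k + 1)).map (pvGetI r)),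
          hrestlen]
        apply List.map_congr_left
        intro t ht
        have htn : t < f'' + 2 := List.mem_range.mp ht
        simp only [Function.comp]
        have eRowT : pvGetRow (sel (r0 :: rest) (c0 :: ctl)) ((t + 1 : ℕ) : ℤ)
            = (c0 :: ctl).map (pvGetI (rest.getD t [])) := by
          rw [pvGetRow, PySem.List.pyGetD_natCast]
          show (sel (r0 :: rest) (c0 :: ctl)).getD (t + 1) [] = _
          have : sel (r0 :: rest) (c0 :: ctl)
              = ((c0 :: ctl).map (pvGetI r0)) :: sel rest (c0 :: ctl) := rfl
          rw [this, List.getD_cons_succ]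
          exact getD_map_getD _ rest t (by omega) [] []
        calc ((PySem.List.pyRange 0 ((f'' + 3 : ℕ) : ℤ)).filter (fun q => q ≠ (k : ℤ))).map
              (fun c => pvEntry (sel (r0 :: rest) (c0 :: ctl)) ((t + 1 : ℕ) : ℤ) c)
            = ((List.range (f'' + 3)).filter (fun q => q ≠ k)).map
                (fun q => ((c0 :: ctl).map (pvGetI (rest.getD t []))).getD q 0) := by
              rw [filter_cast, List.map_map]
              apply List.map_congr_left
              intro q hq
              simp only [Function.comp, pvEntry, eRowT, pvGetI, PySem.List.pyGetD_natCast]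
          _ = ((c0 :: ctl).take k ++ (c0 :: ctl).drop (k + 1)).map (pvGetI (rest.getD t [])) := by
              have h := mapFilterRange_getD ((c0 :: ctl).map (pvGetI (rest.getD t []))) 0 k
                (by simp; omega)
              rw [show ((c0 :: ctl).map (pvGetI (rest.getD t []))).length = f'' + 3 by simp; omega] at h
              rw [h]
              simp [List.map_take, List.map_drop]
      rw [eEntry, eR0, eRows, eCols, eSub]
      rw [ih rest ((c0 :: ctl).take k ++ (c0 :: ctl).drop (k + 1))
        (by simp; omega) (by simp; omega)]


lemma getD_mem_of_lt {α : Type} (xs : List α) (t : ℕ) (ht : t < xs.length) (d : α) :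
    xs.getD t d ∈ xs := by
  rw [List.getD_eq_getElem?_getD, List.getElem?_eq_getElem ht]
  exact List.getElem_mem ht

-- A's cofactor matrix is the selection B reads from
lemma cof_eq_sel (matrix : List (List Int)) (n : ℕ)
    (hlen : matrix.length = n) (hrows : ∀ r ∈ matrix, r.length = n) (i j : ℤ) :
    getCofactorAdjoint matrix i j
      = sel (((PySem.List.pyRange 0 (n : ℤ)).filter (fun r => r ≠ i)).map
              (fun r => PySem.List.pyGetD matrix r []))
            ((PySem.List.pyRange 0 (n : ℤ)).filter (fun c => c ≠ j)) := by
  simp only [getCofactorAdjoint, sel, hlen, List.map_map]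
  apply List.map_congr_left
  intro row hrow
  have hr1 : row ∈ PySem.List.pyRange 0 (n : ℤ) := List.mem_of_mem_filter hrow
  have hr2 := PySem.List.mem_pyRange_one.mp hr1
  have hrn : (pvGetRow matrix row).length = n := by
    apply hrows
    rw [pvGetRow, PySem.List.pyGetD_of_nonneg _ _ hr2.1]
    exact getD_mem_of_lt matrix row.toNat (by rw [hlen]; omega) []
  rw [hrn]
  rfl

lemma transposePre_map' (n : ℕ) (hn : 0 < n) (v : ℤ → ℤ → Int) :
    transposePre ((PySem.List.pyRange 0 (n : ℤ)).map (fun i =>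
        (PySem.List.pyRange 0 (n : ℤ)).map (fun j => v i j)))
      = (PySem.List.pyRange 0 (n : ℤ)).map (fun j =>
        (PySem.List.pyRange 0 (n : ℤ)).map (fun i => v i j)) := by
  rw [PySem.List.pyRange_zero_natCast]
  simp only [List.map_map, Function.comp_def]
  exact transposePre_map n hn (fun i j => v (i : ℤ) (j : ℤ))

-- ===== VERDICT (by name: the statement is the Claim_ definition above) =====
theorem adjoint_pre_spec : Claim_equal_adjoint_pre := by
  intro matrix _ hpre
  obtain ⟨hne, hsq⟩ := hpre
  show adjoint_pre matrix = adjoint_pre_alt matrix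
  have hhead : pvGetRow matrix 0 = matrix.headD [] := by
    cases matrix with
    | nil => exact absurd rfl hne
    | cons x xs => simp [pvGetRow]
  simp only [adjoint_pre, adjoint_pre_alt]
  by_cases hc : (pvGetRow matrix 0).length = matrix.length
  · obtain ⟨hn2, hrows⟩ := hsq (by rw [← hhead]; exact hc)
    rw [if_pos hc.symm, if_neg (by rw [pvGetRow] at hc; omega)]
    simp only [PySem.List.foldl_append_singleton_eq_map, List.nil_append]
    rw [transposePre_map' matrix.length (by omega) (fun i j => (-1 : Int) ^ (i + j).toNat *
      findDetF (getCofactorAdjoint matrix i j).length (getCofactorAdjoint matrix i j))]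
    apply List.map_congr_left
    intro j hj
    apply List.map_congr_left
    intro i hi
    have hj' := PySem.List.mem_pyRange_one.mp hj
    have hi' := PySem.List.mem_pyRange_one.mp hi
    obtain ⟨jj, rfl⟩ : ∃ k : ℕ, j = (k : ℤ) := ⟨j.toNat, (Int.toNat_of_nonneg hj'.1).symm⟩
    obtain ⟨ii, rfl⟩ : ∃ k : ℕ, i = (k : ℤ) := ⟨i.toNat, (Int.toNat_of_nonneg hi'.1).symm⟩
    have hjn : jj < matrix.length := by exact_mod_cast hj'.2
    have hin : ii < matrix.length := by exact_mod_cast hi'.2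
    rw [cof_eq_sel matrix matrix.length rfl hrows (ii : ℤ) (jj : ℤ)]
    have hfl : ∀ (q : ℕ), q < matrix.length →
        ((PySem.List.pyRange 0 (matrix.length : ℤ)).filter (fun c => c ≠ (q : ℤ))).length
          = matrix.length - 1 := by
      intro q hq
      rw [filter_cast, List.length_map, filter_range_ne_len _ _ hq]
    rw [show (sel (((PySem.List.pyRange 0 (matrix.length : ℤ)).filter (fun r => r ≠ (ii : ℤ))).map
        (fun r => PySem.List.pyGetD matrix r []))
        ((PySem.List.pyRange 0 (matrix.length : ℤ)).filter (fun c => c ≠ (jj : ℤ)))).length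
        = ((PySem.List.pyRange 0 (matrix.length : ℤ)).filter (fun c => c ≠ (jj : ℤ))).length by
          simp only [sel, List.length_map]; rw [hfl ii hin, hfl jj hjn]]
    rw [detEq _ _ _ (by simp only [List.length_map]; rw [hfl ii hin, hfl jj hjn]) rfl]
  · rw [if_neg (fun h => hc h.symm), if_pos (by rw [pvGetRow] at hc; omega)]
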